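-- pv_equiv track=rewrite | github.com/Akarshjha03/Information-Network-Security | 3.Playfair_Cipher.py | clean_plaintext
-- ===== SOURCE A (Python) =====
-- def clean_plaintext(text):
--     cleaned = ""
--     i = 0
--     while i < len(text):
--         if i < len(text)-2 and text[i] == text[i+2] and text[i+1] == 'X':
--             cleaned += text[i]
--             i += 2
--         else:
--             cleaned += text[i]
--             i += 1
--     if cleaned.endswith('X'):
--         cleaned = cleaned[:-1]
--     return cleaned
-- ===== SOURCE B (Python) =====
-- import re
--
-- def clean_plaintext(text):
--     # One regex substitution: drop an 'X' whose neighbours are equal; the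
--     # zero-width lookahead keeps the duplicate letter as the next anchor,
--     # matching A's jump to text[i+2]. DOTALL so '.' also matches newlines.
--     cleaned = re.sub(r'(.)X(?=\1)', r'\1', text, flags=re.DOTALL)
--     if cleaned.endswith('X'):
--         cleaned = cleaned[:-1]
--     return cleaned
-- ===== Notes on version B (the rewrite author's own statement) =====
-- stated objective: faster
-- what changed: Replaces A's manual while-loop with index jumping by a single regex substitution re.sub(r'(.)X(?=\1)', r'\1', text, flags=re.DOTALL) whose zero-width lookahead reproduces the re-anchoring at the duplicate letter, keeping the final trailing-'X' strip; the scan runs in the regex engine instead of a Python-level character loop (measured much faster).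
import Mathlib
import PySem

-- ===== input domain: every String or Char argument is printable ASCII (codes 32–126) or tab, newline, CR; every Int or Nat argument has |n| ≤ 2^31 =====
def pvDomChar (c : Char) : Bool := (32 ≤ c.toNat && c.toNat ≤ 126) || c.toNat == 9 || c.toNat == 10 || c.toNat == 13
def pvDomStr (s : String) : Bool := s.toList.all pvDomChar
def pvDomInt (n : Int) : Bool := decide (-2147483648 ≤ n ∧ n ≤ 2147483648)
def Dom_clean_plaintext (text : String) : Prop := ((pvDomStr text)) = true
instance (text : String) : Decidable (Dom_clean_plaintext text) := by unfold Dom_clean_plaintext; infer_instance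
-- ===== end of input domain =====

-- B replaces A's manual index-jumping while-loop by a single regex substitution
-- removing each 'X' flanked by equal characters (objective: faster — the scan runs in the C regex engine, measured faster in a timing run).


-- ===== PORT A =====
-- A's while-loop: index i over the characters, accumulator `cleaned`.
-- `i < len(text)-2` (Python int arithmetic) is written as `i + 2 < cs.length`,
-- which is equivalent for natural i; the guard keeps all indexing in range,
-- so `getD` equals Python's text[i]/text[i+1]/text[i+2].
def pvALoop (cs : List Char) (i : Nat) (acc : List Char) : List Char :=
  if i < cs.length then
    if i + 2 < cs.length ∧ cs.getD i ' ' = cs.getD (i + 2) ' '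
        ∧ cs.getD (i + 1) ' ' = 'X' then
      pvALoop cs (i + 2) (acc ++ [cs.getD i ' '])
    else
      pvALoop cs (i + 1) (acc ++ [cs.getD i ' '])
  else acc
termination_by cs.length - i

def clean_plaintext (text : String) : String :=
  let cleaned := pvALoop text.toList 0 []
  -- if cleaned.endswith('X'): cleaned = cleaned[:-1]
  let cleaned := if cleaned.getLast? = some 'X' then cleaned.dropLast else cleaned
  String.ofList cleaned

-- ===== PORT B =====
-- Hand-written exact model of re.sub(r'(.)X(?=\1)', r'\1', text, flags=re.DOTALL):
-- the regex engine scans left to right; at a match it emits the first character,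
-- consumes the 'X' (the lookahead is zero-width), and resumes at the duplicate
-- character; at a non-match it emits the character and moves one step right.
def pvBScan : List Char → List Char
  | a :: 'X' :: b :: rest =>
      if a = b then a :: pvBScan (b :: rest) else a :: pvBScan ('X' :: b :: rest)
  | a :: rest => a :: pvBScan rest
  | [] => []
termination_by l => l.length
decreasing_by all_goals simp

def clean_plaintext_alt (text : String) : String :=
  let cleaned := pvBScan text.toList
  let cleaned := if cleaned.getLast? = some 'X' then cleaned.dropLast else cleaned
  String.ofList cleaned

-- ===== PRECONDITION & SPEC =====
def Spec_clean_plaintext (text : String) (out : String) : Prop := out = clean_plaintext_alt text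
instance (text : String) (out : String) : Decidable (Spec_clean_plaintext text out) := by unfold Spec_clean_plaintext; infer_instance

-- ===== CLAIM (what is proved, stated in full; the proofs are below) =====
def Claim_equal_clean_plaintext : Prop := ∀ (text : String), Dom_clean_plaintext text → Spec_clean_plaintext text (clean_plaintext text)

-- ===== LEMMAS AND PROOFS =====

-- When no removal starts at `a`, the scan just emits `a` and continues.
lemma pvBScan_cons (a : Char) (l : List Char)
    (h : ∀ b rest, l = 'X' :: b :: rest → a ≠ b) :
    pvBScan (a :: l) = a :: pvBScan l := by
  match l with
  | [] => simp [pvBScan]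
  | [x] => simp [pvBScan]
  | x :: b :: rest =>
    by_cases hx : x = 'X'
    · subst hx
      have hab : a ≠ b := h b rest rfl
      simp [pvBScan, hab]
    · simp [pvBScan, hx]

-- The removal case of the scan.
lemma pvBScan_match (a b : Char) (rest : List Char) (hab : a = b) :
    pvBScan (a :: 'X' :: b :: rest) = a :: pvBScan (b :: rest) := by
  simp [pvBScan, hab]

-- A's loop from index i equals acc ++ the regex scan of the suffix.
lemma pvALoop_eq (cs : List Char) (i : Nat) (acc : List Char) :
    pvALoop cs i acc = acc ++ pvBScan (cs.drop i) := by
  fun_induction pvALoop cs i acc with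
  | case1 i acc hi hc ih =>
    obtain ⟨h2, heq, hX⟩ := hc
    have h0 : i < cs.length := hi
    have h1 : i + 1 < cs.length := by omega
    have hd : cs.drop i = cs[i] :: cs[i+1] :: cs[i+2] :: cs.drop (i + 3) := by
      rw [List.drop_eq_getElem_cons h0, List.drop_eq_getElem_cons h1,
          List.drop_eq_getElem_cons h2]
    have hgi : cs.getD i ' ' = cs[i] := List.getD_eq_getElem cs ' ' h0
    have hg1 : cs.getD (i+1) ' ' = cs[i+1] := List.getD_eq_getElem cs ' ' h1
    have hg2 : cs.getD (i+2) ' ' = cs[i+2] := List.getD_eq_getElem cs ' ' h2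
    have hd2 : cs.drop (i + 2) = cs[i+2] :: cs.drop (i + 3) :=
      List.drop_eq_getElem_cons h2
    rw [ih, hd, hgi]
    rw [hg1] at hX
    rw [hgi, hg2] at heq
    rw [hX, pvBScan_match _ _ _ heq, ← hd2]
    simp
  | case2 i acc hi hc ih =>
    have h0 : i < cs.length := hi
    have hd : cs.drop i = cs[i] :: cs.drop (i + 1) := List.drop_eq_getElem_cons h0
    have hgi : cs.getD i ' ' = cs[i] := List.getD_eq_getElem cs ' ' h0
    rw [ih, hd, hgi]
    have hno : ∀ b rest, cs.drop (i + 1) = 'X' :: b :: rest → cs[i] ≠ b := by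
      intro b rest hform hab
      apply hc
      have h1 : i + 1 < cs.length := by
        by_contra h
        rw [List.drop_eq_nil_of_le (by omega)] at hform
        exact absurd hform (by simp)
      have hd1 : cs.drop (i + 1) = cs[i+1] :: cs.drop (i + 2) :=
        List.drop_eq_getElem_cons h1
      rw [hd1] at hform
      obtain ⟨hx1, hrest⟩ := List.cons.injEq .. ▸ hform
      have h2 : i + 2 < cs.length := by
        by_contra h
        rw [List.drop_eq_nil_of_le (by omega)] at hrest
        exact absurd hrest (by simp)
      have hd2 : cs.drop (i + 2) = cs[i+2] :: cs.drop (i + 3) :=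
        List.drop_eq_getElem_cons h2
      rw [hd2] at hrest
      obtain ⟨hx2, -⟩ := List.cons.injEq .. ▸ hrest
      refine ⟨h2, ?_, ?_⟩
      · rw [List.getD_eq_getElem cs ' ' h0, List.getD_eq_getElem cs ' ' h2,
            hx2, ← hab]
      · rw [List.getD_eq_getElem cs ' ' h1, hx1]
    rw [pvBScan_cons _ _ hno]
    simp
  | case3 i acc hi =>
    rw [List.drop_eq_nil_of_le (by omega)]
    simp [pvBScan]

-- ===== VERDICT (by name: the statement is the Claim_ definition above) =====
theorem clean_plaintext_spec : Claim_equal_clean_plaintext := by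
  intro text _
  unfold Spec_clean_plaintext clean_plaintext clean_plaintext_alt
  have h := pvALoop_eq text.toList 0 []
  simp at h
  rw [h]
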